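-- pv_equiv track=rewrite | github.com/stubents/sungoku | sungoku.py | merge_string_lists
-- ===== SOURCE A (Python) =====
-- def merge_string_lists(first, second):
--     max_length = max([len(first), len(second)])
--     result = []
--     for i in range(max_length):
--         if i < len(first) and i < len(second):
--             result.append(first[i] + '       ' + second[i])
--         elif i < len(first):
--             result.append(first[i])
--         else:
--             result.append(second[i])
--     return result
-- ===== SOURCE B (Python) =====
-- def merge_string_lists(first, second):
--     i, j = len(first), len(second)
--     result = []
--     while i > 0 or j > 0:
--         if i > j:
--             i -= 1
--             result.append(first[i])
--         elif j > i:
--             j -= 1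
--             result.append(second[j])
--         else:
--             i -= 1
--             j -= 1
--             result.append(first[i] + '       ' + second[i])
--     result.reverse()
--     return result
-- ===== Notes on version B (the rewrite author's own statement) =====
-- stated objective: alternative
-- what changed: Builds the result back-to-front with a while loop over two decreasing indices that consumes the longer list's tail first and merges pairs only when the indices meet, reversing once at the end, instead of A's forward index loop with per-element bounds tests.
import Mathlib
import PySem

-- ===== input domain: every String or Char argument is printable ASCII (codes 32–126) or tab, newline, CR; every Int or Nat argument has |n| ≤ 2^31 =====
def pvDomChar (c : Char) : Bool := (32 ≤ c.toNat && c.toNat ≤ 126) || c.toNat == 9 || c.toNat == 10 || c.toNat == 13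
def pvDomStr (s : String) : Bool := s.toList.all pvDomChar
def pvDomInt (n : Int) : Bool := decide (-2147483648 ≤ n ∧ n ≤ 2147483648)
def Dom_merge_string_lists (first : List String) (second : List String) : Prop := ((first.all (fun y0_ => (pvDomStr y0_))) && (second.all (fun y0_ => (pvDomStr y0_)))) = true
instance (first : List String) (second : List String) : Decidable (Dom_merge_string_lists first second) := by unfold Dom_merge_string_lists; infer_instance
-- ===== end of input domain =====

-- B builds the result back-to-front with two decreasing indices and one final reverse, instead of A's forward index loop with per-element bounds tests; same O(n) cost.

-- ===== PORT A =====
-- index loop over range(max(len(first), len(second))) with bounds tests, appending to result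
def merge_string_lists (first : List String) (second : List String) : List String :=
  (PySem.List.pyRange 0 (max (first.length : Int) (second.length : Int)) 1).foldl
    (fun result i =>
      if i < (first.length : Int) ∧ i < (second.length : Int) then
        result ++ [PySem.List.pyGetD first i "" ++ "       " ++ PySem.List.pyGetD second i ""]
      else if i < (first.length : Int) then
        result ++ [PySem.List.pyGetD first i ""]
      else
        result ++ [PySem.List.pyGetD second i ""]) []

-- ===== PORT B =====
-- the while loop of Source B: i, j count down from the lengths; result is appended back-to-front
def mergeLoopB (first second : List String) (i j : Nat) (result : List String) : List String :=
  if i > 0 ∨ j > 0 then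
    if i > j then
      mergeLoopB first second (i - 1) j (result ++ [first.getD (i - 1) ""])
    else if j > i then
      mergeLoopB first second i (j - 1) (result ++ [second.getD (j - 1) ""])
    else
      mergeLoopB first second (i - 1) (j - 1)
        (result ++ [first.getD (i - 1) "" ++ "       " ++ second.getD (i - 1) ""])
  else result
termination_by i + j
decreasing_by all_goals omega

def merge_string_lists_alt (first : List String) (second : List String) : List String :=
  (mergeLoopB first second first.length second.length []).reverse

-- ===== PRECONDITION & SPEC =====
def Spec_merge_string_lists (first : List String) (second : List String) (out : List String) : Prop := out = merge_string_lists_alt first second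
instance (first : List String) (second : List String) (out : List String) : Decidable (Spec_merge_string_lists first second out) := by unfold Spec_merge_string_lists; infer_instance

-- ===== CLAIM (what is proved, stated in full; the proofs are below) =====
def Claim_equal_merge_string_lists : Prop := ∀ (first : List String) (second : List String), Dom_merge_string_lists first second → Spec_merge_string_lists first second (merge_string_lists first second)

-- ===== LEMMAS AND PROOFS =====

-- closed form both ports are reduced to: merged overlap ++ tail of the longer list
def pvSpine (first second : List String) : List String :=
  (List.zipWith (fun a b => a ++ "       " ++ b) first second) ++
    first.drop second.length ++ second.drop first.length

-- Nat-level body of A's loop, after the casts are removed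
def pvStep (first second : List String) (k : Nat) : String :=
  if k < first.length ∧ k < second.length then
    first.getD k "" ++ "       " ++ second.getD k ""
  else if k < first.length then
    first.getD k ""
  else
    second.getD k ""

lemma pvStep_succ (a b : String) (f s : List String) (k : Nat) :
    pvStep (a :: f) (b :: s) (k + 1) = pvStep f s k := by
  simp [pvStep]

lemma pvMap_range_eq (first second : List String) :
    (List.range (max first.length second.length)).map (pvStep first second)
      = pvSpine first second := by
  induction first generalizing second with
  | nil =>
    simp only [pvSpine, List.zipWith_nil_left, List.nil_append, List.length_nil,
      Nat.max_eq_right (Nat.zero_le _), List.drop_zero]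
    rcases second with _ | ⟨b, s⟩
    · simp
    · simp only [List.length_cons]
      apply List.ext_getElem (by simp)
      intro k h1 h2
      simp only [List.length_map, List.length_range] at h1
      simp [pvStep, h1, List.getD]
      exact rfl
  | cons a f ih =>
    rcases second with _ | ⟨b, s⟩
    · simp only [pvSpine, List.zipWith_nil_right, List.nil_append, List.length_nil,
        Nat.max_eq_left (Nat.zero_le _), List.drop_zero]
      apply List.ext_getElem (by simp)
      intro k h1 h2
      simp only [List.length_map, List.length_range] at h1
      have hk : k < (a :: f).length := by simpa using h1
      have hk' : k ≤ f.length := Nat.lt_succ_iff.mp (by simpa using hk)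
      simp [pvStep, hk', List.getD]
      exact rfl
    · have hmax : max (a :: f).length (b :: s).length = max f.length s.length + 1 := by
        simp [Nat.succ_max_succ]
      rw [hmax, List.range_succ_eq_map, List.map_cons, List.map_map]
      have h0 : pvStep (a :: f) (b :: s) 0 = a ++ "       " ++ b := by
        simp [pvStep]
      have hcomp : (pvStep (a :: f) (b :: s)) ∘ Nat.succ = pvStep f s := by
        funext k
        exact pvStep_succ a b f s k
      rw [h0, hcomp, ih s]
      simp [pvSpine]

lemma pvStep_cast (first second : List String) (k : Nat) :
    (if (k : Int) < (first.length : Int) ∧ (k : Int) < (second.length : Int) then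
        PySem.List.pyGetD first (k : Int) "" ++ "       " ++ PySem.List.pyGetD second (k : Int) ""
      else if (k : Int) < (first.length : Int) then
        PySem.List.pyGetD first (k : Int) ""
      else
        PySem.List.pyGetD second (k : Int) "") = pvStep first second k := by
  simp [pvStep, PySem.List.pyGetD_natCast, Nat.cast_lt]

lemma pvA_eq_spine (first second : List String) :
    merge_string_lists first second = pvSpine first second := by
  unfold merge_string_lists
  have hstep : (fun (result : List String) (i : Int) =>
      if i < (first.length : Int) ∧ i < (second.length : Int) then
        result ++ [PySem.List.pyGetD first i "" ++ "       " ++ PySem.List.pyGetD second i ""]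
      else if i < (first.length : Int) then
        result ++ [PySem.List.pyGetD first i ""]
      else
        result ++ [PySem.List.pyGetD second i ""]) =
      (fun result i => result ++
        [if i < (first.length : Int) ∧ i < (second.length : Int) then
          PySem.List.pyGetD first i "" ++ "       " ++ PySem.List.pyGetD second i ""
        else if i < (first.length : Int) then
          PySem.List.pyGetD first i ""
        else
          PySem.List.pyGetD second i ""]) := by
    funext r i; split_ifs <;> rfl
  rw [hstep, PySem.List.foldl_append_singleton_eq_map, List.nil_append]
  rw [show (max (first.length : Int) (second.length : Int)) = ((max first.length second.length : Nat) : Int) by push_cast; rfl]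
  rw [PySem.List.pyRange_zero_natCast, List.map_map]
  calc (List.range (max first.length second.length)).map _
      = (List.range (max first.length second.length)).map (pvStep first second) := by
        apply List.map_congr_left
        intro k _
        exact pvStep_cast first second k
    _ = pvSpine first second := pvMap_range_eq first second


-- zipWith ignores an appended tail on the longer side
lemma pvZip_left (w : String → String → String) (l t b : List String) (h : b.length ≤ l.length) :
    List.zipWith w (l ++ t) b = List.zipWith w l b := by
  induction b generalizing l with
  | nil => simp
  | cons x xs ih =>
    cases l with
    | nil => simp at h
    | cons y ys => simp_all

lemma pvZip_right (w : String → String → String) (a l t : List String) (h : a.length ≤ l.length) :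
    List.zipWith w a (l ++ t) = List.zipWith w a l := by
  induction a generalizing l with
  | nil => simp
  | cons x xs ih =>
    cases l with
    | nil => simp at h
    | cons y ys => simp_all

-- dropping the last element of a take-prefix
lemma pvTake_concat (l : List String) (i : Nat) (h0 : 0 < i) (hi : i ≤ l.length) :
    l.take i = l.take (i - 1) ++ [l.getD (i - 1) ""] := by
  have h : i - 1 + 1 = i := by omega
  have hlt : i - 1 < l.length := by omega
  rw [← h, List.take_add_one]
  simp [List.getD, List.getElem?_eq_getElem hlt]

-- peeling the last element of pvSpine on take-prefixes, one lemma per loop branch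
lemma pvSpine_step_left (f s : List String) (i j : Nat)
    (hij : j < i) (hi : i ≤ f.length) (hj : j ≤ s.length) :
    pvSpine (f.take i) (s.take j) = pvSpine (f.take (i - 1)) (s.take j) ++ [f.getD (i - 1) ""] := by
  have hjlen : (s.take j).length = j := by rw [List.length_take]; omega
  have hilen : (f.take i).length = i := by rw [List.length_take]; omega
  have hilen' : (f.take (i - 1)).length = i - 1 := by rw [List.length_take]; omega
  have h1 : f.take i = f.take (i - 1) ++ [f.getD (i - 1) ""] := pvTake_concat f i (by omega) hi
  unfold pvSpine
  rw [hjlen, hilen, hilen']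
  have hd1 : (s.take j).drop i = [] := List.drop_eq_nil_of_le (by omega)
  have hd2 : (s.take j).drop (i - 1) = [] := List.drop_eq_nil_of_le (by omega)
  rw [hd1, hd2, List.append_nil, List.append_nil]
  rw [h1, pvZip_left _ _ _ _ (by rw [hjlen]; omega),
    List.drop_append_of_le_length (by rw [List.length_take]; omega), List.append_assoc]

lemma pvSpine_step_right (f s : List String) (i j : Nat)
    (hij : i < j) (hi : i ≤ f.length) (hj : j ≤ s.length) :
    pvSpine (f.take i) (s.take j) = pvSpine (f.take i) (s.take (j - 1)) ++ [s.getD (j - 1) ""] := by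
  have hilen : (f.take i).length = i := by rw [List.length_take]; omega
  have hjlen : (s.take j).length = j := by rw [List.length_take]; omega
  have hjlen' : (s.take (j - 1)).length = j - 1 := by rw [List.length_take]; omega
  have h1 : s.take j = s.take (j - 1) ++ [s.getD (j - 1) ""] := pvTake_concat s j (by omega) hj
  unfold pvSpine
  rw [hilen, hjlen, hjlen']
  have hd1 : (f.take i).drop j = [] := List.drop_eq_nil_of_le (by omega)
  have hd2 : (f.take i).drop (j - 1) = [] := List.drop_eq_nil_of_le (by omega)
  rw [hd1, hd2]
  simp only [List.append_nil]
  rw [h1, pvZip_right _ _ _ _ (by rw [hilen]; omega),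
    List.drop_append_of_le_length (by rw [List.length_take]; omega), List.append_assoc]

lemma pvSpine_step_both (f s : List String) (i : Nat)
    (h0 : 0 < i) (hi : i ≤ f.length) (hj : i ≤ s.length) :
    pvSpine (f.take i) (s.take i)
      = pvSpine (f.take (i - 1)) (s.take (i - 1))
          ++ [f.getD (i - 1) "" ++ "       " ++ s.getD (i - 1) ""] := by
  have hilen : (f.take i).length = i := by rw [List.length_take]; omega
  have hjlen : (s.take i).length = i := by rw [List.length_take]; omega
  have hilen' : (f.take (i - 1)).length = i - 1 := by rw [List.length_take]; omega
  have hjlen' : (s.take (i - 1)).length = i - 1 := by rw [List.length_take]; omega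
  unfold pvSpine
  rw [hilen, hjlen, hilen', hjlen']
  have d1 : (f.take i).drop i = [] := List.drop_eq_nil_of_le (le_of_eq hilen)
  have d2 : (s.take i).drop i = [] := List.drop_eq_nil_of_le (le_of_eq hjlen)
  have d3 : (f.take (i - 1)).drop (i - 1) = [] := List.drop_eq_nil_of_le (le_of_eq hilen')
  have d4 : (s.take (i - 1)).drop (i - 1) = [] := List.drop_eq_nil_of_le (le_of_eq hjlen')
  rw [d1, d2, d3, d4]
  simp only [List.append_nil]
  have h1 : f.take i = f.take (i - 1) ++ [f.getD (i - 1) ""] := pvTake_concat f i h0 hi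
  have h2 : s.take i = s.take (i - 1) ++ [s.getD (i - 1) ""] := pvTake_concat s i h0 hj
  rw [h1, h2, List.zipWith_append (by rw [List.length_take, List.length_take]; omega)]
  simp

-- loop invariant: the B loop prepends (in reverse) the spine of the untraversed prefixes
lemma pvLoop_inv (f s : List String) (i j : Nat) (acc : List String)
    (hi : i ≤ f.length) (hj : j ≤ s.length) :
    mergeLoopB f s i j acc = acc ++ (pvSpine (f.take i) (s.take j)).reverse := by
  induction hn : i + j using Nat.strong_induction_on generalizing i j acc with
  | _ n ih =>
  subst hn
  rw [mergeLoopB]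
  by_cases hc : i > 0 ∨ j > 0
  · rw [if_pos hc]
    by_cases h1 : i > j
    · rw [if_pos h1, ih ((i - 1) + j) (by omega) _ _ _ (by omega) hj rfl,
        pvSpine_step_left f s i j h1 hi hj]
      simp
    · rw [if_neg h1]
      by_cases h2 : j > i
      · rw [if_pos h2, ih (i + (j - 1)) (by omega) _ _ _ hi (by omega) rfl,
          pvSpine_step_right f s i j h2 hi hj]
        simp
      · have hij : i = j := by omega
        have h0 : 0 < i := by omega
        rw [if_neg h2, ih ((i - 1) + (j - 1)) (by omega) _ _ _ (by omega) (by omega) rfl]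
        subst hij
        rw [pvSpine_step_both f s i h0 hi hj]
        simp
  · rw [if_neg hc]
    have hi0 : i = 0 := by omega
    have hj0 : j = 0 := by omega
    subst hi0; subst hj0
    simp [pvSpine]

lemma pvB_eq_spine (first second : List String) :
    merge_string_lists_alt first second = pvSpine first second := by
  unfold merge_string_lists_alt
  rw [pvLoop_inv first second first.length second.length [] (le_refl _) (le_refl _)]
  simp

-- ===== VERDICT (by name: the statement is the Claim_ definition above) =====
theorem merge_string_lists_spec : Claim_equal_merge_string_lists := by
  intro first second _
  show merge_string_lists first second = merge_string_lists_alt first second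
  rw [pvA_eq_spine, pvB_eq_spine]
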